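-- pv_equiv track=rewrite | github.com/Hamzeluie/agent_architect | agent_architect/utils.py | get_high_low
-- ===== SOURCE A (Python) =====
-- from typing import Any, Dict, List, Optional, Union
--
-- def get_high_low(inputs: List[str]):
--     high_priority_channle_name = ""
--     low_priority_channle_name = ""
--     for i in inputs:
--         if i.endswith(":high"):
--             high_priority_channle_name = i
--         elif i.endswith(":low"):
--             low_priority_channle_name = i
--     return {"high": high_priority_channle_name, "low": low_priority_channle_name}
-- ===== SOURCE B (Python) =====
-- def get_high_low(inputs):
--     high = next((x for x in reversed(inputs) if x.endswith(":high")), "")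
--     low = next((x for x in reversed(inputs) if x.endswith(":low")), "")
--     return {"high": high, "low": low}
-- ===== Notes on version B (the rewrite author's own statement) =====
-- stated objective: simpler
-- what changed: Replaces the single forward fold that overwrites two accumulators with two independent reverse searches that each return the first (i.e. last overall) suffix match.
import Mathlib
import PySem

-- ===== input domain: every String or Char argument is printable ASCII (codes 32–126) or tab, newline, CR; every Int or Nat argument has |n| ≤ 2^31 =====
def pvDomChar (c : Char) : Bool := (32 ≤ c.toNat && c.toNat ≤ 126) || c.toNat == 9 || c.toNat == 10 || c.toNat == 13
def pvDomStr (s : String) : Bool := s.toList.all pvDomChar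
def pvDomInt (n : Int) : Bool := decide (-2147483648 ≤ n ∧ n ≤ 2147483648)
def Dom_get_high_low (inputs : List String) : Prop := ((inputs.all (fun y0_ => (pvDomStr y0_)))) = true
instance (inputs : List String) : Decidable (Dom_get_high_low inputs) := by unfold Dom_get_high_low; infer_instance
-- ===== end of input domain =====

-- B replaces A's single overwriting forward fold with two independent reverse searches (simpler decomposition; same cost).

-- ===== PORT A =====
def get_high_low (inputs : List String) : List (String × String) :=
  let r := inputs.foldl
    (fun (st : String × String) i =>
      if PySem.Str.endswith i ":high" then (i, st.2)
      else if PySem.Str.endswith i ":low" then (st.1, i)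
      else st)
    ("", "")
  [("high", r.1), ("low", r.2)]

-- ===== PORT B =====
def get_high_low_alt (inputs : List String) : List (String × String) :=
  let high := (inputs.reverse.find? (fun x => PySem.Str.endswith x ":high")).getD ""
  let low := (inputs.reverse.find? (fun x => PySem.Str.endswith x ":low")).getD ""
  [("high", high), ("low", low)]

-- ===== PRECONDITION & SPEC =====
def Spec_get_high_low (inputs : List String) (out : List (String × String)) : Prop := out = get_high_low_alt inputs
instance (inputs : List String) (out : List (String × String)) : Decidable (Spec_get_high_low inputs out) := by unfold Spec_get_high_low; infer_instance

-- ===== CLAIM (what is proved, stated in full; the proofs are below) =====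
def Claim_equal_get_high_low : Prop := ∀ (inputs : List String), Dom_get_high_low inputs → Spec_get_high_low inputs (get_high_low inputs)

-- ===== LEMMAS AND PROOFS =====

-- No string ends with both ":high" and ":low".
theorem not_high_and_low (s : String) :
    PySem.Str.endswith s ":high" = true → PySem.Str.endswith s ":low" = true → False := by
  intro hh hl
  simp only [PySem.Str.endswith_eq] at hh hl
  rw [PySem.Chars.endswith_iff] at hh hl
  rcases List.suffix_or_suffix_of_suffix hh hl with h | h
  · exact absurd h (by decide)
  · exact absurd h (by decide)

theorem fold_eq (inputs : List String) (h l : String) :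
    inputs.foldl
      (fun (st : String × String) i =>
        if PySem.Str.endswith i ":high" then (i, st.2)
        else if PySem.Str.endswith i ":low" then (st.1, i)
        else st)
      (h, l)
    = ((inputs.reverse.find? (fun x => PySem.Str.endswith x ":high")).getD h,
       (inputs.reverse.find? (fun x => PySem.Str.endswith x ":low")).getD l) := by
  induction inputs generalizing h l with
  | nil => simp
  | cons x xs ih =>
    simp only [List.foldl_cons, List.reverse_cons, List.find?_append]
    by_cases hh : PySem.Str.endswith x ":high" = true
    · have hl : ¬ PySem.Str.endswith x ":low" = true := fun hl => not_high_and_low x hh hl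
      have hh2 : PySem.Chars.endswith x.toList [':', 'h', 'i', 'g', 'h'] = true := by simpa using hh
      have hl2 : PySem.Chars.endswith x.toList [':', 'l', 'o', 'w'] = false := by
        simpa using Bool.eq_false_iff.mpr hl
      simp only [hh, if_true, ih]
      cases xs.reverse.find? (fun x => PySem.Str.endswith x ":high") <;>
        cases xs.reverse.find? (fun x => PySem.Str.endswith x ":low") <;>
        simp [List.find?, hh2, hl2]
    · by_cases hl : PySem.Str.endswith x ":low" = true
      · have hl2 : PySem.Chars.endswith x.toList [':', 'l', 'o', 'w'] = true := by simpa using hl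
        have hh2 : PySem.Chars.endswith x.toList [':', 'h', 'i', 'g', 'h'] = false := by
          simpa using Bool.eq_false_iff.mpr hh
        simp only [hh, hl, if_true, ih]
        cases xs.reverse.find? (fun x => PySem.Str.endswith x ":high") <;>
          cases xs.reverse.find? (fun x => PySem.Str.endswith x ":low") <;>
          simp [List.find?, hl2, hh2]
      · have hh2 : PySem.Chars.endswith x.toList [':', 'h', 'i', 'g', 'h'] = false := by
          simpa using Bool.eq_false_iff.mpr hh
        have hl2 : PySem.Chars.endswith x.toList [':', 'l', 'o', 'w'] = false := by
          simpa using Bool.eq_false_iff.mpr hl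
        simp only [hh, hl, ih]
        cases xs.reverse.find? (fun x => PySem.Str.endswith x ":high") <;>
          cases xs.reverse.find? (fun x => PySem.Str.endswith x ":low") <;>
          simp [List.find?, hh2, hl2]

-- ===== VERDICT (by name: the statement is the Claim_ definition above) =====
theorem get_high_low_spec : Claim_equal_get_high_low := by
  intro inputs _
  unfold Spec_get_high_low get_high_low get_high_low_alt
  rw [fold_eq]
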